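-- pv_equiv track=rewrite | github.com/vlong638/VL.Python | 0.Basis/3.Algorithoms/Completed/3.58.四数之和.py | leaveN
-- ===== SOURCE A (Python) =====
-- def leaveN(numbers,n):
--     result=[numbers[0]]
--     count=1
--     i=1
--     while i<len(numbers):
--         if numbers[i]==numbers[i-1]:
--             count+=1
--             if count<=n:
--                 result.append(numbers[i])
--         else:
--             count=1
--             result.append(numbers[i])
--         i+=1
--     return result
-- ===== SOURCE B (Python) =====
-- def leaveN(numbers, n):
--     # run-based: walk maximal runs of consecutive equal values, keep at most max(n,1) of each
--     cap = max(n, 1)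
--     out = []
--     L = len(numbers)
--     i = 0
--     while i < L:
--         j = i + 1
--         while j < L and numbers[j] == numbers[i]:
--             j += 1
--         out += [numbers[i]] * min(cap, j - i)
--         i = j
--     return out
-- ===== Notes on version B (the rewrite author's own statement) =====
-- stated objective: alternative
-- what changed: B splits the list into maximal runs of consecutive equal values and emits [x]*min(max(n,1),runlen) per run, instead of A's per-element scan with a running duplicate counter; B returns [] on the empty list where A raises IndexError.
import Mathlib
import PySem

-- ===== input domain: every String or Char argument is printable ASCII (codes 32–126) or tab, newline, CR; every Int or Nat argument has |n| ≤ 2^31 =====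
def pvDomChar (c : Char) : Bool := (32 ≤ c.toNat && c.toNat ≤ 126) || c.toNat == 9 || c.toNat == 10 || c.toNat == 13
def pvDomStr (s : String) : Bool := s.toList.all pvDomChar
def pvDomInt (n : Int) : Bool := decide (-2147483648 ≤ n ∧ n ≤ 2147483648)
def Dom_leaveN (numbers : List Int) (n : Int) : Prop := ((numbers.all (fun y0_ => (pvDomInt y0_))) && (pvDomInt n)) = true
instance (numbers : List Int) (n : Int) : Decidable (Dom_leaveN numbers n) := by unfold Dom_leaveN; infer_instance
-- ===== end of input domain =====

-- B replaces A's element-by-element scan with a run-based decomposition (maximal runs of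
-- equal values, at most max(n,1) copies kept per run); B returns [] where A raises (empty input).


-- ===== PORT A =====
-- A's while loop over i, carrying count and the accumulated result; numbers[i-1] is carried
-- as prev while the remaining suffix is traversed structurally.
def leaveNLoop (n count prev : Int) (result : List Int) : List Int → List Int
  | [] => result
  | x :: xs =>
    if x == prev then
      if count + 1 ≤ n then leaveNLoop n (count + 1) x (result ++ [x]) xs
      else leaveNLoop n (count + 1) x result xs
    else leaveNLoop n 1 x (result ++ [x]) xs

def leaveN (numbers : List Int) (n : Int) : List Int :=
  match numbers with
  | [] => []          -- A raises IndexError here (numbers[0]); excluded by Pre_leaveN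
  | x :: xs => leaveNLoop n 1 x [x] xs

-- ===== PORT B =====
-- length of the maximal prefix of the list equal to x (Source B's inner while counting the run)
def runLen (x : Int) : List Int → Nat
  | [] => 0
  | y :: ys => if y == x then runLen x ys + 1 else 0

-- Source B's outer while loop over runs: the position i is represented by the remaining
-- suffix numbers[i:], the inner while's count j - i is runLen + 1, and out grows by
-- min(cap, j - i) copies of the run's value per iteration (here built front-to-back).
-- cap = max n 1 ≥ 1, so cap.toNat is exactly Python's cap in min(cap, j - i).
-- fuel (initially the list length) only makes the loop structural recursion; each
-- iteration consumes at least one element, so the 0-fuel branch is never reached.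
def leaveNGo (cap : Int) : Nat → List Int → List Int
  | _, [] => []
  | 0, _ => []
  | fuel + 1, x :: xs =>
    let k := runLen x xs + 1
    List.replicate (min cap.toNat k) x ++ leaveNGo cap fuel (xs.drop (runLen x xs))

def leaveN_alt (numbers : List Int) (n : Int) : List Int :=
  leaveNGo (max n 1) numbers.length numbers

-- ===== PRECONDITION & SPEC =====
-- Pre_ excludes only the empty list, on which A raises IndexError (numbers[0]); B returns [] there.
def Pre_leaveN (numbers : List Int) (n : Int) : Prop := numbers ≠ []
instance (numbers : List Int) (n : Int) : Decidable (Pre_leaveN numbers n) := by unfold Pre_leaveN; infer_instance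
def pvWitness_leaveN : List Int × Int := ([1, 1, 1, 2], 2)

def Spec_leaveN (numbers : List Int) (n : Int) (out : List Int) : Prop := out = leaveN_alt numbers n
instance (numbers : List Int) (n : Int) (out : List Int) : Decidable (Spec_leaveN numbers n out) := by unfold Spec_leaveN; infer_instance

-- ===== CLAIM (what is proved, stated in full; the proofs are below) =====
def Claim_equal_leaveN : Prop := ∀ (numbers : List Int) (n : Int), Dom_leaveN numbers n → Pre_leaveN numbers n → Spec_leaveN numbers n (leaveN numbers n)

-- ===== LEMMAS AND PROOFS =====

-- accumulator-free form of A's loop, used only by the proofs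
def fA (n count prev : Int) : List Int → List Int
  | [] => []
  | x :: xs =>
    if x == prev then
      if count + 1 ≤ n then x :: fA n (count + 1) x xs
      else fA n (count + 1) x xs
    else x :: fA n 1 x xs

theorem leaveNLoop_acc (xs : List Int) : ∀ (n count prev : Int) (result : List Int),
    leaveNLoop n count prev result xs = result ++ fA n count prev xs := by
  induction xs with
  | nil => intro n c p r; simp [leaveNLoop, fA]
  | cons x xs ih =>
    intro n c p r
    simp only [leaveNLoop, fA]
    split_ifs <;> simp [ih]

-- A's loop across one maximal run: keeps min(runLen, (n-count)⁺) copies, then resets.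
theorem fA_run (xs : List Int) : ∀ (n c x : Int),
    fA n c x xs = List.replicate (min (runLen x xs) (n - c).toNat) x ++
      (match xs.drop (runLen x xs) with
       | [] => []
       | y :: ys => y :: fA n 1 y ys) := by
  induction xs with
  | nil => intro n c x; simp [fA, runLen]
  | cons y ys ih =>
    intro n c x
    by_cases h : y = x
    · subst h
      simp only [fA, runLen, beq_self_eq_true, if_true]
      rw [ih]
      by_cases hn : c + 1 ≤ n
      · have h1 : min (runLen y ys + 1) (n - c).toNat = min (runLen y ys) (n - (c+1)).toNat + 1 := by omega
        simp only [hn, if_true, h1, List.replicate_succ]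
        simp
      · have h1 : min (runLen y ys + 1) (n - c).toNat = min (runLen y ys) (n - (c+1)).toNat := by omega
        simp [hn, h1]
    · have hb : (y == x) = false := by simp [h]
      simp [fA, runLen, hb]

theorem main_run (m : Nat) : ∀ (xs : List Int), xs.length ≤ m → ∀ (x n : Int),
    x :: fA n 1 x xs = leaveNGo (max n 1) (m + 1) (x :: xs) := by
  induction m with
  | zero =>
    intro xs h x n
    have hxs : xs = [] := List.eq_nil_of_length_eq_zero (by omega)
    subst hxs
    have hr : runLen x ([] : List Int) = 0 := rfl
    have hmin : min (max n 1).toNat (runLen x ([] : List Int) + 1) = 1 := by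
      rw [hr]; omega
    simp only [fA, leaveNGo, hmin, List.replicate_one, List.drop_nil, List.append_nil]
  | succ m ih =>
    intro xs hlen x n
    rw [fA_run]
    simp only [leaveNGo]
    have hmin : min (max n 1).toNat (runLen x xs + 1) = min (runLen x xs) (n - 1).toNat + 1 := by
      omega
    rw [hmin, List.replicate_succ, List.cons_append]
    congr 1
    congr 1
    cases hd : xs.drop (runLen x xs) with
    | nil => simp [leaveNGo]
    | cons y ys =>
      have hys : ys.length ≤ m := by
        have := List.length_drop (l := xs) (i := runLen x xs)
        rw [hd] at this
        simp at this
        omega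
      exact ih ys hys y n

-- ===== VERDICT (by name: the statement is the Claim_ definition above) =====
theorem leaveN_spec : Claim_equal_leaveN := by
  intro numbers n _ hpre
  unfold Spec_leaveN leaveN leaveN_alt
  cases numbers with
  | nil => exact absurd rfl hpre
  | cons x xs =>
    show leaveNLoop n 1 x [x] xs = leaveNGo (max n 1) (x :: xs).length (x :: xs)
    rw [leaveNLoop_acc]
    simpa using main_run xs.length xs le_rfl x n
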